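-- pv_equiv track=rewrite | github.com/sam-karis/mr_dist | driver.py | get_bucket_id_ref
-- ===== SOURCE A (Python) =====
-- import string
--
-- def get_bucket_id_ref(number_reduce_tasks):
--     """
--     Create an object with all potential bucket_ids given the number of reduce tasks
--     Example {"a": "1", "b": "2", ...}
--     """
--     alp_num = string.digits + string.ascii_lowercase
--     alp_num_length = len(alp_num)
--     bucket_len = alp_num_length // number_reduce_tasks
--     bucket_modulus = alp_num_length % number_reduce_tasks
--     sub_buckets_list = []
--     sub_count, lower_limit, upper_limit = 0, 0, 0
--     for i in range(0, number_reduce_tasks):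
--         if sub_count < bucket_modulus:
--             upper_limit += bucket_len + 1
--         else:
--             upper_limit += bucket_len
--         sub_buckets_list.append(alp_num[lower_limit:upper_limit])
--         lower_limit = upper_limit
--         sub_count += 1
--
--     res = {}
--     for index, sub_bucket in enumerate(sub_buckets_list):
--         for char in sub_bucket:
--             res[char] = f"{index}"
--     return res
-- ===== SOURCE B (Python) =====
-- import string
--
-- def get_bucket_id_ref(number_reduce_tasks):
--     """Single closed-form pass: each character's bucket index is computed
--     directly from its position, with no intermediate sub-bucket list."""
--     if number_reduce_tasks <= 0:
--         return {}
--     alp_num = string.digits + string.ascii_lowercase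
--     bucket_len, bucket_modulus = divmod(len(alp_num), number_reduce_tasks)
--     split = bucket_modulus * (bucket_len + 1)
--     res = {}
--     for j, char in enumerate(alp_num):
--         if j < split:
--             bucket = j // (bucket_len + 1)
--         else:
--             bucket = bucket_modulus + (j - split) // bucket_len
--         res[char] = f"{bucket}"
--     return res
-- ===== Notes on version B (the rewrite author's own statement) =====
-- stated objective: faster
-- what changed: Instead of building a sub-bucket list with one loop iteration per reduce task and then re-scanning it, B computes each of the 36 characters' bucket index directly by a closed-form division on its position, so the work no longer grows with number_reduce_tasks.
import Mathlib
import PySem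

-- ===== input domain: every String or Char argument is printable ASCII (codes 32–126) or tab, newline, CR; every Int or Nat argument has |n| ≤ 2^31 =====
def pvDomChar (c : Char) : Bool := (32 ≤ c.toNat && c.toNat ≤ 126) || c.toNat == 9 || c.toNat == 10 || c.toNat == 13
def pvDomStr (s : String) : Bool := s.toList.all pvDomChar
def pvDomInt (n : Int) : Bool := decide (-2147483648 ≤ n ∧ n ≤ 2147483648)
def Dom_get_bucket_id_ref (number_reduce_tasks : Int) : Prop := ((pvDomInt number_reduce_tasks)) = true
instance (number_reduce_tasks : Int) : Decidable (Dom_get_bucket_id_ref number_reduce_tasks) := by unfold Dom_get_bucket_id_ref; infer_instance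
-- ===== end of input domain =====

-- B replaces A's sub-bucket list construction and re-scan by a single closed-form pass that
-- computes each character's bucket index directly from its position (objective: faster for large task counts).


-- ===== PORT A =====
-- string.digits + string.ascii_lowercase, as a list of characters
def pvAlp : List Char := "0123456789abcdefghijklmnopqrstuvwxyz".toList

def get_bucket_id_ref (number_reduce_tasks : Int) : List (String × String) :=
  let alp_num := pvAlp
  let alp_num_length : Int := (alp_num.length : Int)
  let bucket_len := PySem.Int.floordiv alp_num_length number_reduce_tasks
  let bucket_modulus := PySem.Int.mod alp_num_length number_reduce_tasks
  -- state: (sub_buckets_list in reverse, sub_count, lower_limit, upper_limit);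
  -- Python's O(1) list.append is ported as cons onto the reversed accumulator, undone by .reverse below
  let st := (PySem.List.pyRange 0 number_reduce_tasks 1).foldl
    (fun (st : List (List Char) × Int × Int × Int) _i =>
      let upper := if st.2.1 < bucket_modulus then st.2.2.2 + (bucket_len + 1) else st.2.2.2 + bucket_len
      (PySem.List.slice pvAlp (some st.2.2.1) (some upper) :: st.1, st.2.1 + 1, upper, upper))
    ([], 0, 0, 0)
  -- 'for index, sub_bucket in enumerate(sub_buckets_list)': the running index is carried in the accumulator
  let res := st.1.reverse.foldl
    (fun (acc : PySem.Dict String String × Int) sb =>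
      (sb.foldl (fun r c => r.insert (String.singleton c) (PySem.Int.toStr acc.2)) acc.1, acc.2 + 1))
    (PySem.Dict.empty, 0)
  res.1.items

-- ===== PORT B =====
def get_bucket_id_ref_alt (number_reduce_tasks : Int) : List (String × String) :=
  if number_reduce_tasks ≤ 0 then [] else
  let bucket_len := PySem.Int.floordiv (pvAlp.length : Int) number_reduce_tasks
  let bucket_modulus := PySem.Int.mod (pvAlp.length : Int) number_reduce_tasks
  let split := bucket_modulus * (bucket_len + 1)
  let res := (PySem.List.enumerate pvAlp 0).foldl
    (fun (res : PySem.Dict String String) p =>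
      let bucket := if p.1 < split then PySem.Int.floordiv p.1 (bucket_len + 1)
                    else bucket_modulus + PySem.Int.floordiv (p.1 - split) bucket_len
      res.insert (String.singleton p.2) (PySem.Int.toStr bucket))
    PySem.Dict.empty
  res.items

-- ===== PRECONDITION & SPEC =====
-- Pre_ excludes only number_reduce_tasks = 0, where A raises ZeroDivisionError.
def Pre_get_bucket_id_ref (number_reduce_tasks : Int) : Prop := number_reduce_tasks ≠ 0
instance (number_reduce_tasks : Int) : Decidable (Pre_get_bucket_id_ref number_reduce_tasks) := by unfold Pre_get_bucket_id_ref; infer_instance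
def pvWitness_get_bucket_id_ref : Int := 3

def Spec_get_bucket_id_ref (number_reduce_tasks : Int) (out : List (String × String)) : Prop := out = get_bucket_id_ref_alt number_reduce_tasks
instance (number_reduce_tasks : Int) (out : List (String × String)) : Decidable (Spec_get_bucket_id_ref number_reduce_tasks out) := by unfold Spec_get_bucket_id_ref; infer_instance

-- ===== CLAIM (what is proved, stated in full; the proofs are below) =====
def Claim_equal_get_bucket_id_ref : Prop := ∀ (number_reduce_tasks : Int), Dom_get_bucket_id_ref number_reduce_tasks → Pre_get_bucket_id_ref number_reduce_tasks → Spec_get_bucket_id_ref number_reduce_tasks (get_bucket_id_ref number_reduce_tasks)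

-- ===== LEMMAS AND PROOFS =====

-- the common result for every number_reduce_tasks > 36: each character is its own bucket
def pvBig : List (String × String) := [("0", "0"), ("1", "1"), ("2", "2"), ("3", "3"), ("4", "4"), ("5", "5"), ("6", "6"), ("7", "7"), ("8", "8"), ("9", "9"), ("a", "10"), ("b", "11"), ("c", "12"), ("d", "13"), ("e", "14"), ("f", "15"), ("g", "16"), ("h", "17"), ("i", "18"), ("j", "19"), ("k", "20"), ("l", "21"), ("m", "22"), ("n", "23"), ("o", "24"), ("p", "25"), ("q", "26"), ("r", "27"), ("s", "28"), ("t", "29"), ("u", "30"), ("v", "31"), ("w", "32"), ("x", "33"), ("y", "34"), ("z", "35")]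

-- A's sub_buckets_list after the first 36 iterations when bucket_len = 0, bucket_modulus = 36
def pvS36 : List (List Char) := [['0'], ['1'], ['2'], ['3'], ['4'], ['5'], ['6'], ['7'], ['8'], ['9'], ['a'], ['b'], ['c'], ['d'], ['e'], ['f'], ['g'], ['h'], ['i'], ['j'], ['k'], ['l'], ['m'], ['n'], ['o'], ['p'], ['q'], ['r'], ['s'], ['t'], ['u'], ['v'], ['w'], ['x'], ['y'], ['z']]

-- the same list reversed: A's accumulator after the first 36 iterations
def pvS36rev : List (List Char) := pvS36.reverse

lemma pv_floordiv_big (n : Int) (h : 36 < n) : PySem.Int.floordiv ((pvAlp.length : Nat) : Int) n = 0 := by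
  have hlen : ((pvAlp.length : Nat) : Int) = 36 := by decide
  rw [hlen, PySem.Int.floordiv_eq_iff_of_pos (by omega)]
  constructor <;> omega

lemma pv_mod_big (n : Int) (h : 36 < n) : PySem.Int.mod ((pvAlp.length : Nat) : Int) n = 36 := by
  have hlen : ((pvAlp.length : Nat) : Int) = 36 := by decide
  have h2 := PySem.Int.floordiv_mul_add_mod ((pvAlp.length : Nat) : Int) n
  rw [pv_floordiv_big n h, hlen] at *
  omega

-- tail of A's first loop once sub_count ≥ bucket_modulus = 36: only empty slices get appended
lemma pv_tailA (k : Nat) : ∀ (a : Int) (subs : List (List Char)), 36 ≤ a →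
    List.foldl
      (fun (st : List (List Char) × Int × Int × Int) (_i : Int) =>
        (PySem.List.slice pvAlp (some st.2.2.1) (some (if st.2.1 < 36 then st.2.2.2 + (0 + 1) else st.2.2.2 + 0)) :: st.1,
          st.2.1 + 1, if st.2.1 < 36 then st.2.2.2 + (0 + 1) else st.2.2.2 + 0,
          if st.2.1 < 36 then st.2.2.2 + (0 + 1) else st.2.2.2 + 0))
      (subs, a, 36, 36) (PySem.List.pyRange a (a + (k : Nat)) 1)
    = (List.replicate k [] ++ subs, a + (k : Nat), 36, 36) := by
  induction k with
  | zero =>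
    intro a subs ha
    rw [PySem.List.pyRange_one_eq_nil (by push_cast; omega)]
    simp
  | succ k ih =>
    intro a subs ha
    rw [PySem.List.pyRange_one_cons (by push_cast; omega)]
    simp only [List.foldl_cons]
    have hif : ¬ (a < 36) := by omega
    rw [if_neg hif]
    have hsl : PySem.List.slice pvAlp (some (36 : Int)) (some ((36 : Int) + 0)) = [] := by decide
    rw [hsl, show ((36 : Int) + 0) = 36 from by norm_num]
    rw [show a + ((k + 1 : Nat) : Int) = (a + 1) + (k : Nat) from by push_cast; omega]
    rw [show List.replicate (k + 1) ([] : List Char) ++ subs = List.replicate k [] ++ ([] :: subs) from by simp [List.replicate_succ']]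
    exact ih (a + 1) ([] :: subs) (by omega)

-- the res loop ignores the appended empty sub-buckets
lemma pv_resTail (k : Nat) : ∀ (acc : PySem.Dict String String × Int),
    (List.foldl
      (fun (acc : PySem.Dict String String × Int) (sb : List Char) =>
        (List.foldl (fun r c => r.insert (String.singleton c) (PySem.Int.toStr acc.2)) acc.1 sb, acc.2 + 1))
      acc (List.replicate k ([] : List Char))).1
    = acc.1 := by
  induction k with
  | zero => intro acc; simp
  | succ k ih =>
    intro acc
    rw [List.replicate_succ]
    simp only [List.foldl_cons, List.foldl_nil]
    exact ih (acc.1, acc.2 + 1)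

set_option maxRecDepth 40000 in
lemma pv_big_case (n : Int) (h : 36 < n) : get_bucket_id_ref n = get_bucket_id_ref_alt n := by
  obtain ⟨k, rfl⟩ : ∃ k : Nat, n = 36 + (k : Int) := ⟨(n - 36).toNat, by omega⟩
  have hq := pv_floordiv_big (36 + (k : Int)) h
  have hm := pv_mod_big (36 + (k : Int)) h
  have hA : get_bucket_id_ref (36 + (k : Int)) = pvBig := by
    unfold get_bucket_id_ref
    simp only [hq, hm]
    rw [PySem.List.pyRange_one_append 0 36 (36 + (k : Int)) (by omega) (by omega), List.foldl_append]
    have h36 : List.foldl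
        (fun (st : List (List Char) × Int × Int × Int) (_i : Int) =>
          (PySem.List.slice pvAlp (some st.2.2.1) (some (if st.2.1 < 36 then st.2.2.2 + (0 + 1) else st.2.2.2 + 0)) :: st.1,
            st.2.1 + 1, if st.2.1 < 36 then st.2.2.2 + (0 + 1) else st.2.2.2 + 0,
            if st.2.1 < 36 then st.2.2.2 + (0 + 1) else st.2.2.2 + 0))
        ([], 0, 0, 0) (PySem.List.pyRange 0 36 1) = (pvS36rev, 36, 36, 36) := by decide
    rw [h36, pv_tailA k 36 pvS36rev (by omega)]
    simp only
    rw [show (List.replicate k ([] : List Char) ++ pvS36rev).reverse = pvS36 ++ List.replicate k [] from by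
      rw [List.reverse_append, List.reverse_replicate]
      rfl]
    rw [List.foldl_append]
    have hd36 : List.foldl
        (fun (acc : PySem.Dict String String × Int) (sb : List Char) =>
          (List.foldl (fun r c => r.insert (String.singleton c) (PySem.Int.toStr acc.2)) acc.1 sb, acc.2 + 1))
        (PySem.Dict.empty, 0) pvS36 = (PySem.Dict.mk pvBig, 36) := by decide
    rw [hd36, pv_resTail k (PySem.Dict.mk pvBig, 36)]
  have hB : get_bucket_id_ref_alt (36 + (k : Int)) = pvBig := by
    unfold get_bucket_id_ref_alt
    rw [if_neg (by omega : ¬ (36 + (k : Int)) ≤ 0)]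
    simp only [hq, hm]
    decide
  rw [hA, hB]

lemma pv_neg_case (n : Int) (h : n < 0) : get_bucket_id_ref n = get_bucket_id_ref_alt n := by
  unfold get_bucket_id_ref get_bucket_id_ref_alt
  rw [PySem.List.pyRange_one_eq_nil (le_of_lt h), if_pos (le_of_lt h)]
  simp
  rfl

set_option maxRecDepth 40000 in
lemma pv_small_case (n : Int) (h1 : 1 ≤ n) (h2 : n ≤ 36) : get_bucket_id_ref n = get_bucket_id_ref_alt n := by
  interval_cases n <;> decide

-- ===== VERDICT (by name: the statement is the Claim_ definition above) =====
theorem get_bucket_id_ref_spec : Claim_equal_get_bucket_id_ref := by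
  intro n _hdom hpre
  unfold Spec_get_bucket_id_ref
  rcases lt_trichotomy n 0 with h | h | h
  · exact pv_neg_case n h
  · exact absurd h hpre
  · by_cases h36 : n ≤ 36
    · exact pv_small_case n (by omega) h36
    · exact pv_big_case n (by omega)
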